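-- pv_equiv track=rewrite | github.com/superyyrrzz/codejam | Kickstart-2018/Round-A/Even-Digits.py | find_left_most_odd_index
-- ===== SOURCE A (Python) =====
-- def find_left_most_odd_index(n):
--   res = -1
--   index = 0
--   remain = n
--   while remain > 0:
--     if remain % 2 == 1:
--       res = index
--     index += 1
--     remain = remain // 10
--   return res
-- ===== SOURCE B (Python) =====
-- def find_left_most_odd_index(n):
--     if n <= 0:
--         return -1
--     # count the digits of n
--     d = 0
--     m = n
--     while m > 0:
--         m //= 10
--         d += 1
--     # scan from the most significant position downward, stop at the first odd digit
--     i = d - 1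
--     while i >= 0:
--         if (n // 10 ** i) % 2 == 1:
--             return i
--         i -= 1
--     return -1
-- ===== Notes on version B (the rewrite author's own statement) =====
-- stated objective: alternative
-- what changed: B counts the digits first and then scans positions from the most significant end downward with an early return at the first odd digit, instead of A's single upward loop that tracks the last odd position seen.
import Mathlib
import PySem

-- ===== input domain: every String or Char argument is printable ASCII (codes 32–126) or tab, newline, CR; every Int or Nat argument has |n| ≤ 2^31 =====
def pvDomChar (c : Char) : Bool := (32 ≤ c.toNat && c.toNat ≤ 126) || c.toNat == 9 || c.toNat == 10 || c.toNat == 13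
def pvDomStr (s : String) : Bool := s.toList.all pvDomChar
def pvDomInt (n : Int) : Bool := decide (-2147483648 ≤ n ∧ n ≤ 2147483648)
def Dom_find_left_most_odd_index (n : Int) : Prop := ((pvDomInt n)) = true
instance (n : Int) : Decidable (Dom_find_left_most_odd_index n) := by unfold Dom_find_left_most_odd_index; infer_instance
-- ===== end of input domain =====

-- B counts digits first, then scans positions from the most significant end downward with an
-- early return at the first odd digit (alternative decomposition; A tracks the last odd
-- position in one upward loop).


-- ===== PORT A =====
-- while remain > 0: if remain % 2 == 1: res = index; index += 1; remain //= 10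
def pvLoopA (res index remain : Int) : Int :=
  if h : remain > 0 then
    pvLoopA (if PySem.Int.mod remain 2 = 1 then index else res) (index + 1)
      (PySem.Int.floordiv remain 10)
  else res
termination_by remain.toNat
decreasing_by
  have h10 : PySem.Int.floordiv remain 10 = remain / 10 :=
    PySem.Int.floordiv_eq_ediv_of_pos (by omega)
  rw [h10]; omega

def find_left_most_odd_index (n : Int) : Int := pvLoopA (-1) 0 n

-- ===== PORT B =====
-- while m > 0: m //= 10; d += 1
def pvCountB (m d : Int) : Int :=
  if h : m > 0 then pvCountB (PySem.Int.floordiv m 10) (d + 1) else d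
termination_by m.toNat
decreasing_by
  have h10 : PySem.Int.floordiv m 10 = m / 10 :=
    PySem.Int.floordiv_eq_ediv_of_pos (by omega)
  rw [h10]; omega

-- while i >= 0: if (n // 10 ** i) % 2 == 1: return i; i -= 1
-- (10 ** i ported as (10:Int) ^ i.toNat — exact since the loop guard gives i ≥ 0)
def pvScanB (n i : Int) : Int :=
  if h : i ≥ 0 then
    if PySem.Int.mod (PySem.Int.floordiv n ((10 : Int) ^ i.toNat)) 2 = 1 then i
    else pvScanB n (i - 1)
  else -1
termination_by (i + 1).toNat
decreasing_by omega

def find_left_most_odd_index_alt (n : Int) : Int :=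
  if n ≤ 0 then -1
  else pvScanB n (pvCountB n 0 - 1)

-- ===== PRECONDITION & SPEC =====
def Spec_find_left_most_odd_index (n : Int) (out : Int) : Prop := out = find_left_most_odd_index_alt n
instance (n : Int) (out : Int) : Decidable (Spec_find_left_most_odd_index n out) := by unfold Spec_find_left_most_odd_index; infer_instance

-- ===== CLAIM (what is proved, stated in full; the proofs are below) =====
def Claim_equal_find_left_most_odd_index : Prop := ∀ (n : Int), Dom_find_left_most_odd_index n → Spec_find_left_most_odd_index n (find_left_most_odd_index n)

-- ===== LEMMAS AND PROOFS =====

-- greatest k in [index, index+fuel) with (n / 10^k) odd, else -1 (prefers the upper half)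
def gmaxIn (n index : ℕ) : ℕ → Int
  | 0 => -1
  | f + 1 =>
    let u := gmaxIn n (index + 1) f
    if u ≠ -1 then u else if (n / 10 ^ index) % 2 = 1 then (index : Int) else -1

theorem gmaxIn_top (n : ℕ) : ∀ (f index : ℕ),
    gmaxIn n index (f + 1) =
      if (n / 10 ^ (index + f)) % 2 = 1 then ((index + f : ℕ) : Int) else gmaxIn n index f := by
  intro f
  induction f with
  | zero => intro index; simp [gmaxIn]
  | succ f ih =>
    intro index
    have h1 : gmaxIn n index (f + 1 + 1) =
        (if gmaxIn n (index + 1) (f + 1) ≠ -1 then gmaxIn n (index + 1) (f + 1)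
         else if (n / 10 ^ index) % 2 = 1 then (index : Int) else -1) := rfl
    rw [h1, ih (index + 1)]
    have h2 : index + 1 + f = index + (f + 1) := by omega
    rw [h2]
    by_cases hp : (n / 10 ^ (index + (f + 1))) % 2 = 1
    · simp only [hp, if_true]
      simp
      omega
    · simp only [hp, if_false]
      rw [show gmaxIn n index (f + 1) =
        (if gmaxIn n (index + 1) f ≠ -1 then gmaxIn n (index + 1) f
         else if (n / 10 ^ index) % 2 = 1 then (index : Int) else -1) from rfl]

theorem gmaxIn_zero (n : ℕ) : ∀ (f index : ℕ), n / 10 ^ index = 0 → gmaxIn n index f = -1 := by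
  intro f
  induction f with
  | zero => intro index _; rfl
  | succ f ih =>
    intro index h0
    have hnext : n / 10 ^ (index + 1) = 0 := by
      rw [pow_succ, ← Nat.div_div_eq_div_mul, h0]
    have hu : gmaxIn n (index + 1) f = -1 := ih _ hnext
    simp [gmaxIn, hu, h0]

-- A's loop computes gmaxIn (with res as the default)
theorem loopA_eq (n : ℕ) : ∀ (f index : ℕ) (res : Int), n / 10 ^ index < 10 ^ f →
    pvLoopA res index (((n / 10 ^ index : ℕ) : Int)) =
      (if gmaxIn n index f = -1 then res else gmaxIn n index f) := by
  intro f
  induction f with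
  | zero =>
    intro index res hb
    have h0 : n / 10 ^ index = 0 := Nat.lt_one_iff.mp (by simpa using hb)
    rw [h0]
    rw [pvLoopA]
    simp [gmaxIn]
  | succ f ih =>
    intro index res hb
    by_cases h0 : n / 10 ^ index = 0
    · rw [h0, pvLoopA]
      have := gmaxIn_zero n (f + 1) index h0
      simp [this]
    · set q : ℕ := n / 10 ^ index with hq
      have hq0 : 0 < q := Nat.pos_of_ne_zero h0
      have hqpos : ((q : ℕ) : Int) > 0 := by exact_mod_cast hq0
      rw [pvLoopA]
      simp only [hqpos, dif_pos]
      have hmod : PySem.Int.mod ((q : ℕ) : Int) 2 = ((q % 2 : ℕ) : Int) := by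
        exact_mod_cast PySem.Int.mod_natCast q 2
      have hdiv : PySem.Int.floordiv ((q : ℕ) : Int) 10 = ((q / 10 : ℕ) : Int) := by
        exact_mod_cast PySem.Int.floordiv_natCast q 10
      have hnext : q / 10 = n / 10 ^ (index + 1) := by
        rw [hq, pow_succ, ← Nat.div_div_eq_div_mul]
      have hbnext : n / 10 ^ (index + 1) < 10 ^ f := by
        rw [← hnext]
        have h1 : q < 10 ^ (f + 1) := hb
        have h2 : (0 : ℕ) < 10 ^ f := by positivity
        rw [pow_succ] at h1
        omega
      rw [hmod, hdiv, hnext]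
      rw [show ((index : Int) + 1) = ((index + 1 : ℕ) : Int) by push_cast; ring]
      rw [ih (index + 1) _ hbnext]
      have hgm : gmaxIn n index (f + 1) =
          (if gmaxIn n (index + 1) f ≠ -1 then gmaxIn n (index + 1) f
           else if q % 2 = 1 then (index : Int) else -1) := rfl
      rw [hgm]
      by_cases hu : gmaxIn n (index + 1) f = -1
      · simp only [hu, ne_eq, not_true_eq_false, if_false]
        by_cases hp : q % 2 = 1
        · simp [hp]
        · have hql : ¬ ((q : ℕ) : Int) % 2 = 1 := by omega
          simp [hql, hp]
      · simp [hu]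

-- B's scan computes gmaxIn 0
theorem scanB_eq (n : ℕ) : ∀ (f : ℕ), pvScanB ((n : ℕ) : Int) ((f : Int) - 1) = gmaxIn n 0 f := by
  intro f
  induction f with
  | zero => rw [pvScanB]; simp [gmaxIn]
  | succ f ih =>
    rw [pvScanB]
    have hge : ((f + 1 : ℕ) : Int) - 1 ≥ 0 := by omega
    simp only [hge, dif_pos]
    have htn : (((f + 1 : ℕ) : Int) - 1).toNat = f := by omega
    rw [htn]
    have hdiv : PySem.Int.floordiv ((n : ℕ) : Int) ((10 : Int) ^ f) = ((n / 10 ^ f : ℕ) : Int) := by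
      have := PySem.Int.floordiv_natCast n (10 ^ f)
      push_cast at this ⊢
      exact this
    have hmod : PySem.Int.mod ((n / 10 ^ f : ℕ) : Int) 2 = ((n / 10 ^ f % 2 : ℕ) : Int) := by
      exact_mod_cast PySem.Int.mod_natCast (n / 10 ^ f) 2
    rw [hdiv, hmod]
    rw [gmaxIn_top n f 0]
    simp only [Nat.zero_add]
    by_cases hp : n / 10 ^ f % 2 = 1
    · simp [hp]
    · have hql : ¬ ((n / 10 ^ f % 2 : ℕ) : Int) = 1 := by omega
      have h2 : ((f + 1 : ℕ) : Int) - 1 - 1 = ((f : ℕ) : Int) - 1 := by omega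
      simp only [hql, if_false, hp, h2, ih]

-- B's digit count: pvCountB m d = d + c with m < 10^c
theorem countB_spec (m : ℕ) : ∀ (d : Int), ∃ c : ℕ, pvCountB ((m : ℕ) : Int) d = d + c ∧ m < 10 ^ c := by
  induction m using Nat.strong_induction_on with
  | _ m ih =>
    intro d
    by_cases h0 : m = 0
    · refine ⟨0, ?_, by simp [h0]⟩
      rw [h0, pvCountB]; simp
    · have hlt : m / 10 < m := Nat.div_lt_self (by omega) (by omega)
      obtain ⟨c, hc, hb⟩ := ih (m / 10) hlt (d + 1)
      refine ⟨c + 1, ?_, ?_⟩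
      · rw [pvCountB]
        have hpos : ((m : ℕ) : Int) > 0 := by omega
        simp only [hpos, dif_pos]
        have hdiv : PySem.Int.floordiv ((m : ℕ) : Int) 10 = ((m / 10 : ℕ) : Int) := by
          exact_mod_cast PySem.Int.floordiv_natCast m 10
        rw [hdiv, hc]; push_cast; ring
      · have : m < 10 * (m / 10 + 1) := by omega
        calc m < 10 * (m / 10 + 1) := this
          _ ≤ 10 * 10 ^ c := by omega
          _ = 10 ^ (c + 1) := by ring

theorem main_pos (n : ℕ) :
    pvLoopA (-1) 0 ((n : ℕ) : Int) = pvScanB ((n : ℕ) : Int) (pvCountB ((n : ℕ) : Int) 0 - 1) := by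
  obtain ⟨c, hc, hb⟩ := countB_spec n 0
  have hc0 : pvCountB ((n : ℕ) : Int) 0 = (c : Int) := by rw [hc]; ring
  have hA : pvLoopA (-1) 0 ((n : ℕ) : Int) =
      (if gmaxIn n 0 c = -1 then (-1 : Int) else gmaxIn n 0 c) := by
    have := loopA_eq n c 0 (-1) (by simpa using hb)
    simpa using this
  have hB : pvScanB ((n : ℕ) : Int) (pvCountB ((n : ℕ) : Int) 0 - 1) = gmaxIn n 0 c := by
    rw [hc0]; exact scanB_eq n c
  rw [hA, hB]
  by_cases hg : gmaxIn n 0 c = -1 <;> simp [hg]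

-- ===== VERDICT (by name: the statement is the Claim_ definition above) =====
theorem find_left_most_odd_index_spec : Claim_equal_find_left_most_odd_index := by
  intro n _
  unfold Spec_find_left_most_odd_index find_left_most_odd_index find_left_most_odd_index_alt
  by_cases hle : n ≤ 0
  · rw [pvLoopA]
    simp [hle, show ¬ n > 0 by omega]
  · simp only [hle, if_false]
    obtain ⟨m, hm⟩ : ∃ m : ℕ, n = ((m : ℕ) : Int) := ⟨n.toNat, by omega⟩
    subst hm
    exact main_pos m
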